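-- pv_equiv track=rewrite | github.com/vikavnebo/my-romance-club.ru | stories/functions.py | create_breadcrumbs
-- ===== SOURCE A (Python) =====
-- def create_breadcrumbs(titles: tuple, urls: tuple, path='/') -> list:
-- 	breadcrumbs = []
-- 	i = 0
-- 	for title in titles:
-- 		item = {}
-- 		if breadcrumbs:
-- 			path += urls[i] + '/'
-- 			i += 1
-- 		item['name'] = title
-- 		item['url'] = path
-- 		breadcrumbs.append(item)
-- 	return breadcrumbs
-- ===== SOURCE B (Python) =====
-- def create_breadcrumbs(titles: tuple, urls: tuple, path='/') -> list:
--     # Precompute the cumulative url prefixes, then pair each title with its prefix.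
--     paths = [path]
--     for u in urls:
--         paths.append(paths[-1] + (u + '/'))
--     return [{'name': t, 'url': paths[i]} for i, t in enumerate(titles)]
-- ===== Notes on version B (the rewrite author's own statement) =====
-- stated objective: simpler
-- what changed: Replaces A's single loop with mutable path/counter state and an 'if breadcrumbs' first-iteration guard by a precomputed prefix-path table followed by a stateless pairing comprehension.
import Mathlib
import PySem

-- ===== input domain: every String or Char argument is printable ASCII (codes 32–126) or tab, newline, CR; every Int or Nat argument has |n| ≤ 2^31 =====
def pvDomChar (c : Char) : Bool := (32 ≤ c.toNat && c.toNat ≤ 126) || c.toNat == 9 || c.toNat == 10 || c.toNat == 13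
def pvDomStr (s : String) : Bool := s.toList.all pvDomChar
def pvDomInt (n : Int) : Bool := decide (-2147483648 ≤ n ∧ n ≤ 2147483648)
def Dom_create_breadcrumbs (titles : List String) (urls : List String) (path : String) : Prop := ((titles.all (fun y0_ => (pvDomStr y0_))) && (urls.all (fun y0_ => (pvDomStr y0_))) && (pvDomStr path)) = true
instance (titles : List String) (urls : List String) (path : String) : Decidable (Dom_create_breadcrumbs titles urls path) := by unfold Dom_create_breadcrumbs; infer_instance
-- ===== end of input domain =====

-- B replaces A's stateful loop (mutable path, manual counter, 'if breadcrumbs' first-iteration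
-- guard) by a precomputed prefix-path table and a stateless pairing pass (objective: simpler).

-- ===== PORT A =====
-- state: (breadcrumbs, i, path); 'if breadcrumbs:' = bc ≠ []
def create_breadcrumbs (titles : List String) (urls : List String) (path : String) : List (List (String × String)) :=
  (titles.foldl
    (fun (st : List (List (String × String)) × Nat × String) title =>
      let bc := st.1
      let i := st.2.1
      let p := st.2.2
      if bc ≠ [] then
        let p' := p ++ (PySem.List.pyGet? urls (Int.ofNat i)).getD "" ++ "/"
        (bc ++ [[("name", title), ("url", p')]], i + 1, p')
      else
        (bc ++ [[("name", title), ("url", p)]], i, p))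
    ([], 0, path)).1

-- ===== PORT B =====
def create_breadcrumbs_alt (titles : List String) (urls : List String) (path : String) : List (List (String × String)) :=
  let paths := urls.foldl
    (fun ps u => ps ++ [(PySem.List.pyGet? ps (-1)).getD "" ++ (u ++ "/")]) [path]
  (PySem.List.enumerate titles).map
    (fun it => [("name", it.2), ("url", (PySem.List.pyGet? paths it.1).getD "")])

-- ===== PRECONDITION & SPEC =====
-- Pre_ excludes exactly the inputs on which A raises IndexError (urls[i] with i = len(urls)):
-- more titles than urls+1.
def Pre_create_breadcrumbs (titles : List String) (urls : List String) (path : String) : Prop :=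
  titles.length ≤ urls.length + 1
instance (titles : List String) (urls : List String) (path : String) : Decidable (Pre_create_breadcrumbs titles urls path) := by unfold Pre_create_breadcrumbs; infer_instance

def pvWitness_create_breadcrumbs : List String × List String × String :=
  (["Home", "Stories", "Hero"], ["stories", "hero"], "/")

def Spec_create_breadcrumbs (titles : List String) (urls : List String) (path : String) (out : List (List (String × String))) : Prop := out = create_breadcrumbs_alt titles urls path
instance (titles : List String) (urls : List String) (path : String) (out : List (List (String × String))) : Decidable (Spec_create_breadcrumbs titles urls path out) := by unfold Spec_create_breadcrumbs; infer_instance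

-- ===== CLAIM (what is proved, stated in full; the proofs are below) =====
def Claim_equal_create_breadcrumbs : Prop := ∀ (titles : List String) (urls : List String) (path : String), Dom_create_breadcrumbs titles urls path → Pre_create_breadcrumbs titles urls path → Spec_create_breadcrumbs titles urls path (create_breadcrumbs titles urls path)

-- ===== LEMMAS AND PROOFS =====

-- the prefix-path table: pvPref us p = [p, p ++ us[0] ++ "/", p ++ us[0] ++ "/" ++ us[1] ++ "/", …]
def pvPref : List String → String → List String
  | [], p => [p]
  | u :: us, p => p :: pvPref us (p ++ u ++ "/")

theorem pvPref_zero (us : List String) (p : String) : (pvPref us p)[0]? = some p := by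
  cases us <;> simp [pvPref]

theorem pvPref_succ (us : List String) (p : String) (i : Nat) (h : i < us.length) :
    (pvPref us p)[i + 1]?.getD "" =
      (pvPref us p)[i]?.getD "" ++ us[i]?.getD "" ++ "/" := by
  induction us generalizing p i with
  | nil => simp at h
  | cons u us ih =>
    cases i with
    | zero => simp [pvPref, pvPref_zero]
    | succ j =>
      simp only [pvPref, List.getElem?_cons_succ, List.length_cons] at h ⊢
      exact ih (p ++ u ++ "/") j (by omega)

-- B's paths-building fold produces pvPref
theorem pvPaths_eq (us : List String) (ps : List String) (p : String) :
    us.foldl (fun acc u => acc ++ [(PySem.List.pyGet? acc (-1)).getD "" ++ (u ++ "/")])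
        (ps ++ [p]) = ps ++ pvPref us p := by
  induction us generalizing ps p with
  | nil => simp [pvPref]
  | cons u us ih =>
    simp only [List.foldl_cons, PySem.List.pyGet?_neg_one_append_singleton, Option.getD_some,
      pvPref, String.append_assoc]
    have := ih (ps ++ [p]) (p ++ u ++ "/")
    simpa [List.append_assoc, String.append_assoc] using this

-- the common shape of both loops after the first title
def pvGo (urls : List String) : List String → Nat → String → List (List (String × String))
  | [], _, _ => []
  | t :: ts, i, p =>
    let p' := p ++ (PySem.List.pyGet? urls (Int.ofNat i)).getD "" ++ "/"
    [("name", t), ("url", p')] :: pvGo urls ts (i + 1) p'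

-- A's fold, once breadcrumbs is nonempty, appends pvGo
theorem pvA_fold (urls : List String) (ts : List String) :
    ∀ (bc : List (List (String × String))) (i : Nat) (p : String), bc ≠ [] →
    (ts.foldl
      (fun (st : List (List (String × String)) × Nat × String) title =>
        if st.1 ≠ [] then
          (st.1 ++ [[("name", title), ("url", st.2.2 ++ (PySem.List.pyGet? urls (Int.ofNat st.2.1)).getD "" ++ "/")]],
            st.2.1 + 1, st.2.2 ++ (PySem.List.pyGet? urls (Int.ofNat st.2.1)).getD "" ++ "/")
        else (st.1 ++ [[("name", title), ("url", st.2.2)]], st.2.1, st.2.2))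
      (bc, i, p)).1 = bc ++ pvGo urls ts i p := by
  induction ts with
  | nil => intro bc i p _; simp [pvGo]
  | cons t ts ih =>
    intro bc i p hbc
    simp only [List.foldl_cons, if_pos hbc, pvGo]
    rw [ih (bc ++ [[("name", t), ("url", p ++ (PySem.List.pyGet? urls (Int.ofNat i)).getD "" ++ "/")]])
        (i + 1) _ (by simp)]
    simp

-- pvGo started at i with the i-th prefix produces B's per-title entries
theorem pvGo_eq (urls : List String) (path : String) (ts : List String) :
    ∀ (i : Nat), i + ts.length ≤ urls.length →
    pvGo urls ts i ((pvPref urls path)[i]?.getD "") =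
      (PySem.List.enumerate ts (Int.ofNat (i + 1))).map
        (fun it => [("name", it.2), ("url", (PySem.List.pyGet? (pvPref urls path) it.1).getD "")]) := by
  induction ts with
  | nil => intro i _; simp [pvGo, PySem.List.enumerate]
  | cons t ts ih =>
    intro i h
    simp only [List.length_cons] at h
    have hi : i < urls.length := by omega
    have hstep : (pvPref urls path)[i]?.getD "" ++ (PySem.List.pyGet? urls (Int.ofNat i)).getD "" ++ "/"
        = (pvPref urls path)[i + 1]?.getD "" := by
      rw [pvPref_succ urls path i hi]
      simp [Int.ofNat_eq_natCast, PySem.List.pyGet?_natCast]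
    simp only [pvGo, PySem.List.enumerate_cons, List.map_cons]
    rw [hstep, ih (i + 1) (by omega)]
    simp only [Int.ofNat_eq_natCast, PySem.List.pyGet?_natCast]
    norm_cast

-- ===== VERDICT (by name: the statement is the Claim_ definition above) =====
theorem create_breadcrumbs_spec : Claim_equal_create_breadcrumbs := by
  intro titles urls path _ hpre
  unfold Spec_create_breadcrumbs create_breadcrumbs create_breadcrumbs_alt
  have hpaths := pvPaths_eq urls [] path
  simp only [List.nil_append] at hpaths
  rw [hpaths]
  cases titles with
  | nil => simp [PySem.List.enumerate]
  | cons t ts =>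
    simp only [List.foldl_cons, if_neg (by simp : ¬(([] : List (List (String × String))) ≠ []))]
    rw [List.nil_append, pvA_fold urls ts [[("name", t), ("url", path)]] 0 path (by simp)]
    have hlen : (0 : Nat) + ts.length ≤ urls.length := by
      unfold Pre_create_breadcrumbs at hpre; simp only [List.length_cons] at hpre; omega
    have hgo := pvGo_eq urls path ts 0 hlen
    rw [pvPref_zero] at hgo
    simp only [Option.getD_some] at hgo
    rw [hgo]
    simp [PySem.List.enumerate_cons, PySem.List.pyGet?_zero, pvPref_zero]
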